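-- pv_equiv track=rewrite | github.com/lordch/ticker-to-theisis | scripts/pdf-to-png.py | parse_pages
-- ===== SOURCE A (Python) =====
-- def parse_pages(spec: str, total: int) -> list[int]:
--     """Parse page spec like '1-10' or '5' into 0-based page indices."""
--     pages = []
--     for part in spec.split(","):
--         part = part.strip()
--         if "-" in part:
--             a, b = part.split("-", 1)
--             start = max(int(a) - 1, 0)
--             end = min(int(b), total)
--             pages.extend(range(start, end))
--         else:
--             idx = int(part) - 1
--             if 0 <= idx < total:
--                 pages.append(idx)
--     return sorted(set(pages))
-- ===== SOURCE B (Python) =====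
-- def parse_pages(spec: str, total: int) -> list[int]:
--     """Parse page spec like '1-10' or '5' into 0-based page indices."""
--     parts = [p.strip() for p in spec.split(",")]
--     hi = 0
--     for p in parts:
--         if "-" in p:
--             hi = max(hi, int(p.split("-", 1)[1]))
--         else:
--             hi = max(hi, int(p))
--     return [i for i in range(min(hi, total)) if any(_covers(i, p) for p in parts)]
--
--
-- def _covers(i: int, p: str) -> bool:
--     if "-" in p:
--         a, b = p.split("-", 1)
--         return int(a) - 1 <= i < int(b)
--     return i == int(p) - 1
-- ===== Notes on version B (the rewrite author's own statement) =====
-- stated objective: alternative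
-- what changed: B never materialises or sorts page lists: it computes an upper bound from the parts, then scans the candidate index space 0..min(hi,total) once and keeps each index that some comma-part covers, replacing A's extend/set/sorted pipeline by a filter over the index range.
import Mathlib
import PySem

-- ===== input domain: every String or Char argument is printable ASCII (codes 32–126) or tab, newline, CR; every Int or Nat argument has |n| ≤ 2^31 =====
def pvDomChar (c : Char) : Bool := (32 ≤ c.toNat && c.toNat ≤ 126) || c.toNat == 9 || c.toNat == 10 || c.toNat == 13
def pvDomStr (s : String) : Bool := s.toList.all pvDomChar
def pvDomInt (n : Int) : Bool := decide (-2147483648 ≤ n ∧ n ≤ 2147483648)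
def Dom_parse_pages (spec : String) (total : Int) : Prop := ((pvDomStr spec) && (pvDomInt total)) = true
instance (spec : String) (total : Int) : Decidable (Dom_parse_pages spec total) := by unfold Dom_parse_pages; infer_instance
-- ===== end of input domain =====

-- B replaces A's extend/set/sorted pipeline by a single filter over the candidate index
-- range 0..min(hi,total) (hi = an upper bound computed from the parts), keeping the indices
-- some comma-part covers (objective: alternative).

-- ===== PORT A =====
-- one step of A's loop body: append the indices this comma-part contributes
def pvPartStepA (total : Int) (pages : List Int) (part : String) : List Int :=
  let p := PySem.Str.strip part
  if PySem.Str.isIn "-" p then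
    let ab := (PySem.Str.splitMax? p "-" 1).getD []
    let start := max ((PySem.Int.ofStr? (ab.getD 0 "")).getD 0 - 1) 0
    let e := min ((PySem.Int.ofStr? (ab.getD 1 "")).getD 0) total
    pages ++ PySem.List.pyRange start e 1
  else
    let idx := (PySem.Int.ofStr? p).getD 0 - 1
    if 0 ≤ idx ∧ idx < total then pages ++ [idx] else pages

def parse_pages (spec : String) (total : Int) : List Int :=
  let pages := ((PySem.Str.split? spec ",").getD []).foldl (pvPartStepA total) []
  PySem.List.sorted (PySem.Set.ofList pages) (fun x => x) false

-- ===== PORT B =====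
-- the hi loop of Source B: running maximum of this part's upper bound
def pvHiStep (hi : Int) (p : String) : Int :=
  if PySem.Str.isIn "-" p then
    max hi ((PySem.Int.ofStr? (((PySem.Str.splitMax? p "-" 1).getD []).getD 1 "")).getD 0)
  else
    max hi ((PySem.Int.ofStr? p).getD 0)

-- Source B's _covers helper
def pvCovers (i : Int) (p : String) : Bool :=
  if PySem.Str.isIn "-" p then
    decide ((PySem.Int.ofStr? (((PySem.Str.splitMax? p "-" 1).getD []).getD 0 "")).getD 0 - 1 ≤ i ∧
      i < (PySem.Int.ofStr? (((PySem.Str.splitMax? p "-" 1).getD []).getD 1 "")).getD 0)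
  else
    decide (i = (PySem.Int.ofStr? p).getD 0 - 1)

def parse_pages_alt (spec : String) (total : Int) : List Int :=
  let parts := ((PySem.Str.split? spec ",").getD []).map PySem.Str.strip
  let hi := parts.foldl pvHiStep 0
  (PySem.List.pyRange 0 (min hi total) 1).filter (fun i => parts.any (fun p => pvCovers i p))

-- ===== PRECONDITION & SPEC =====
-- Pre_ excludes exactly the inputs where A raises ValueError: some comma-part (stripped) is not a
-- valid int literal — for a part containing '-', either side of its first '-' fails int().
def Pre_parse_pages (spec : String) (total : Int) : Prop :=
  ∀ part ∈ (PySem.Str.split? spec ",").getD [],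
    let p := PySem.Str.strip part
    if PySem.Str.isIn "-" p then
      let ab := (PySem.Str.splitMax? p "-" 1).getD []
      (PySem.Int.ofStr? (ab.getD 0 "")).isSome ∧ (PySem.Int.ofStr? (ab.getD 1 "")).isSome
    else (PySem.Int.ofStr? p).isSome
instance (spec : String) (total : Int) : Decidable (Pre_parse_pages spec total) := by
  unfold Pre_parse_pages; infer_instance
def pvWitness_parse_pages : String × Int := ("1-3, 5", 10)

def Spec_parse_pages (spec : String) (total : Int) (out : List Int) : Prop := out = parse_pages_alt spec total
instance (spec : String) (total : Int) (out : List Int) : Decidable (Spec_parse_pages spec total out) := by unfold Spec_parse_pages; infer_instance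

-- ===== CLAIM (what is proved, stated in full; the proofs are below) =====
def Claim_equal_parse_pages : Prop := ∀ (spec : String) (total : Int), Dom_parse_pages spec total → Pre_parse_pages spec total → Spec_parse_pages spec total (parse_pages spec total)

-- ===== LEMMAS AND PROOFS =====

-- the upper bound of a (stripped) part, as used by Source B's hi loop
def pvBound (p : String) : Int :=
  if PySem.Str.isIn "-" p then
    (PySem.Int.ofStr? (((PySem.Str.splitMax? p "-" 1).getD []).getD 1 "")).getD 0
  else (PySem.Int.ofStr? p).getD 0

theorem pvHiStep_eq (hi : Int) (p : String) : pvHiStep hi p = max hi (pvBound p) := by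
  unfold pvHiStep pvBound; split <;> rfl

theorem foldl_hi_ge (l : List String) (c : Int) : c ≤ l.foldl pvHiStep c := by
  induction l generalizing c with
  | nil => exact le_refl _
  | cons h t ih =>
      rw [List.foldl_cons, pvHiStep_eq]
      exact le_trans (le_max_left _ _) (ih _)

theorem bound_le_foldl_hi (l : List String) (c : Int) (p : String) (hp : p ∈ l) :
    pvBound p ≤ l.foldl pvHiStep c := by
  induction l generalizing c with
  | nil => cases hp
  | cons h t ih =>
      rw [List.foldl_cons, pvHiStep_eq]
      rcases List.mem_cons.mp hp with rfl | hm
      · exact le_trans (le_max_right _ _) (foldl_hi_ge _ _)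
      · exact ih _ hm

theorem covers_lt_bound (i : Int) (p : String) : pvCovers i p = true → i < pvBound p := by
  unfold pvCovers pvBound
  split <;> simp only [decide_eq_true_eq] <;> omega

-- the indices one of A's comma-parts contributes
def pvF (total : Int) (part : String) : List Int :=
  if PySem.Str.isIn "-" (PySem.Str.strip part) then
    PySem.List.pyRange
      (max ((PySem.Int.ofStr? (((PySem.Str.splitMax? (PySem.Str.strip part) "-" 1).getD []).getD 0 "")).getD 0 - 1) 0)
      (min ((PySem.Int.ofStr? (((PySem.Str.splitMax? (PySem.Str.strip part) "-" 1).getD []).getD 1 "")).getD 0) total) 1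
  else
    if 0 ≤ (PySem.Int.ofStr? (PySem.Str.strip part)).getD 0 - 1 ∧
        (PySem.Int.ofStr? (PySem.Str.strip part)).getD 0 - 1 < total then
      [(PySem.Int.ofStr? (PySem.Str.strip part)).getD 0 - 1]
    else []

-- A's foldl is the flatMap of the per-part index lists
theorem foldlA_eq (total : Int) (parts : List String) (acc : List Int) :
    parts.foldl (pvPartStepA total) acc = acc ++ parts.flatMap (pvF total) := by
  induction parts generalizing acc with
  | nil => simp
  | cons h t ih =>
      rw [List.foldl_cons, ih, List.flatMap_cons]
      simp only [pvPartStepA, pvF]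
      split
      · simp
      · split
        · simp
        · simp

-- membership in one part's contribution, in terms of Source B's cover test
theorem mem_pvF (total : Int) (part : String) (x : Int) :
    x ∈ pvF total part ↔ pvCovers x (PySem.Str.strip part) = true ∧ 0 ≤ x ∧ x < total := by
  unfold pvF pvCovers
  generalize (PySem.Int.ofStr? (((PySem.Str.splitMax? (PySem.Str.strip part) "-" 1).getD []).getD 0 "")).getD 0 = a
  generalize (PySem.Int.ofStr? (((PySem.Str.splitMax? (PySem.Str.strip part) "-" 1).getD []).getD 1 "")).getD 0 = b
  generalize (PySem.Int.ofStr? (PySem.Str.strip part)).getD 0 = v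
  split
  · rw [PySem.List.mem_pyRange_one]
    simp only [decide_eq_true_eq]
    omega
  · split <;> rename_i hg
    · simp only [List.mem_singleton, decide_eq_true_eq]
      omega
    · simp only [List.not_mem_nil, false_iff, decide_eq_true_eq, not_and]
      omega

-- ===== VERDICT (by name: the statement is the Claim_ definition above) =====
theorem parse_pages_spec : Claim_equal_parse_pages := by
  intro spec total _ _
  unfold Spec_parse_pages parse_pages parse_pages_alt
  rw [foldlA_eq]
  simp only [List.nil_append]
  set parts := (PySem.Str.split? spec ",").getD [] with hparts
  set hi := (parts.map PySem.Str.strip).foldl pvHiStep 0 with hhi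
  have hpw : ((PySem.List.pyRange 0 (min hi total) 1).filter
      (fun i => (parts.map PySem.Str.strip).any (fun p => pvCovers i p))).Pairwise (· < ·) :=
    (PySem.List.pairwise_lt_pyRange_one _ _).filter _
  apply PySem.List.sorted_eq_of_perm_of_pairwise_lt _ _ _ _ hpw
  refine (List.perm_ext_iff_of_nodup (hpw.imp fun h => ne_of_lt h) (PySem.Set.nodup_ofList _)).mpr ?_
  intro x
  rw [List.mem_filter, PySem.List.mem_pyRange_one, PySem.Set.mem_ofList, List.mem_flatMap,
    List.any_eq_true]
  constructor
  · rintro ⟨⟨h0, hm⟩, p, hp, hc⟩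
    obtain ⟨part, hpart, rfl⟩ := List.mem_map.mp hp
    exact ⟨part, hpart, (mem_pvF total part x).mpr ⟨hc, h0, lt_of_lt_of_le hm (min_le_right _ _)⟩⟩
  · rintro ⟨part, hpart, hx⟩
    obtain ⟨hc, h0, ht⟩ := (mem_pvF total part x).mp hx
    have hb : x < hi := lt_of_lt_of_le (covers_lt_bound _ _ hc)
      (bound_le_foldl_hi _ 0 _ (List.mem_map_of_mem hpart))
    exact ⟨⟨h0, lt_min hb ht⟩, PySem.Str.strip part, List.mem_map_of_mem hpart, hc⟩
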